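-- pv_equiv track=rewrite | github.com/abdullahalafjal/Codeforce-Problem-Solving | B.Rakhsh's Revival.py | minimum_timars
-- ===== SOURCE A (Python) =====
-- def minimum_timars(t, test_cases):
--     results = []
--     for n, m, k, s in test_cases:
--         operations = 0
--         current_zeros = 0
--
--         for char in s:
--             if char == "0":
--                 current_zeros += 1
--             else:
--
--                 if current_zeros >= m:
--                     operations += (current_zeros + k - 1) // k
--                 current_zeros = 0
--
--         if current_zeros >= m:
--             operations += (current_zeros + k - 1) // k
--
--         results.append(operations)
--
--     return results
-- ===== SOURCE B (Python) =====
-- def _zero_segments(s):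
--     # replace every non-'0' character by a single delimiter, then split keeping empties
--     return ''.join(c if c == '0' else '|' for c in s).split('|')
--
-- def minimum_timars(t, test_cases):
--     return [sum((len(p) + k - 1) // k for p in _zero_segments(s) if len(p) >= m)
--             for n, m, k, s in test_cases]
-- ===== Notes on version B (the rewrite author's own statement) =====
-- stated objective: simpler
-- what changed: Replaces A's stateful char-by-char run accumulator with trailing flush by a two-phase decomposition: split the string into its zero-segments (map non-'0' chars to a delimiter, then split) and take a filtered sum of ceil(len/k) over segments with len >= m.
import Mathlib
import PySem

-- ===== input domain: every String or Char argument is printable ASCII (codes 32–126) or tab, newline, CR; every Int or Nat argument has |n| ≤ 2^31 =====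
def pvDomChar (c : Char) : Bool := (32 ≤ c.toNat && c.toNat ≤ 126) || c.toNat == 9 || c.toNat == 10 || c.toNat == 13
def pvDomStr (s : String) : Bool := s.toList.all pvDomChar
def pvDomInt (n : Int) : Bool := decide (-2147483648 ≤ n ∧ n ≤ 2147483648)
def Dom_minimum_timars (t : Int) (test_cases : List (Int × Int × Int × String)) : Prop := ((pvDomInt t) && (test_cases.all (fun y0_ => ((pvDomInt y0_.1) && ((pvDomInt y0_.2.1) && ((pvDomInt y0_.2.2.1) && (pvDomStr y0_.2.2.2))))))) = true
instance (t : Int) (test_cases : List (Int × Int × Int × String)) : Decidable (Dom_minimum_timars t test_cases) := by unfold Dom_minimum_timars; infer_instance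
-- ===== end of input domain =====

-- B replaces A's stateful char-by-char accumulator (with trailing flush) by a two-phase
-- split-into-zero-segments-then-filtered-sum decomposition (objective: simpler; same cost).

-- ===== PORT A =====
-- inner char loop of A: state (operations, current_zeros); trailing flush on [].
def pvLoopA (m k : Int) : List Char → Int → Int → Int
  | [], ops, cur => if m ≤ cur then ops + PySem.Int.floordiv (cur + k - 1) k else ops
  | c :: rest, ops, cur =>
      if c = '0' then pvLoopA m k rest ops (cur + 1)
      else pvLoopA m k rest (if m ≤ cur then ops + PySem.Int.floordiv (cur + k - 1) k else ops) 0

def minimum_timars (t : Int) (test_cases : List (Int × Int × Int × String)) : List Int :=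
  test_cases.foldl (fun results tc => results ++ [pvLoopA tc.2.1 tc.2.2.1 tc.2.2.2.toList 0 0]) []

-- ===== PORT B =====
-- Source B's _zero_segments: map every non-'0' char to a delimiter and split keeping empties
-- (ported by hand, step for step: exact on all inputs).
def pvSeg : List Char → List (List Char)
  | [] => [[]]
  | c :: rest =>
      if c = '0' then
        match pvSeg rest with
        | p :: ps => (c :: p) :: ps
        | [] => [[c]]   -- unreachable: pvSeg never returns []
      else [] :: pvSeg rest

def minimum_timars_alt (t : Int) (test_cases : List (Int × Int × Int × String)) : List Int :=
  test_cases.map (fun tc =>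
    (((pvSeg tc.2.2.2.toList).filter (fun p => tc.2.1 ≤ (p.length : Int))).map
      (fun p => PySem.Int.floordiv ((p.length : Int) + tc.2.2.1 - 1) tc.2.2.1)).sum)

-- ===== PRECONDITION & SPEC =====
-- maximum length of a maximal run of '0' in the string (cur = length of the run in progress)
def pvMaxZeroRun : List Char → Nat → Nat
  | [], cur => cur
  | c :: rest, cur => if c = '0' then pvMaxZeroRun rest (cur + 1) else max cur (pvMaxZeroRun rest 0)

-- Pre_ excludes exactly the inputs where Python A raises ZeroDivisionError: a test case with
-- k = 0 in which the ceiling division is reached, i.e. m ≤ 0 or some maximal zero-run has length ≥ m.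
def Pre_minimum_timars (t : Int) (test_cases : List (Int × Int × Int × String)) : Prop :=
  ∀ tc ∈ test_cases, tc.2.2.1 ≠ 0 ∨ (0 < tc.2.1 ∧ (pvMaxZeroRun tc.2.2.2.toList 0 : Int) < tc.2.1)
instance (t : Int) (test_cases : List (Int × Int × Int × String)) : Decidable (Pre_minimum_timars t test_cases) := by unfold Pre_minimum_timars; infer_instance

def pvWitness_minimum_timars : Int × (List (Int × Int × Int × String)) := (1, [(5, 2, 2, "00100"), (3, 1, 3, "111")])

def Spec_minimum_timars (t : Int) (test_cases : List (Int × Int × Int × String)) (out : List Int) : Prop := out = minimum_timars_alt t test_cases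
instance (t : Int) (test_cases : List (Int × Int × Int × String)) (out : List Int) : Decidable (Spec_minimum_timars t test_cases out) := by unfold Spec_minimum_timars; infer_instance

-- ===== CLAIM (what is proved, stated in full; the proofs are below) =====
def Claim_equal_minimum_timars : Prop := ∀ (t : Int) (test_cases : List (Int × Int × Int × String)), Dom_minimum_timars t test_cases → Pre_minimum_timars t test_cases → Spec_minimum_timars t test_cases (minimum_timars t test_cases)

-- ===== LEMMAS AND PROOFS =====

-- one segment's contribution to B's sum
def pvContrib (m k : Int) (L : Int) : Int :=
  if m ≤ L then PySem.Int.floordiv (L + k - 1) k else 0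

def pvSumB (m k : Int) (ps : List (List Char)) : Int :=
  ((ps.filter (fun p => m ≤ (p.length : Int))).map
    (fun p => PySem.Int.floordiv ((p.length : Int) + k - 1) k)).sum

lemma pvSeg_ne_nil (xs : List Char) : pvSeg xs ≠ [] := by
  cases xs with
  | nil => simp [pvSeg]
  | cons c rest =>
    simp only [pvSeg]
    split
    · cases h : pvSeg rest <;> simp
    · simp

lemma pvSumB_cons (m k : Int) (p : List Char) (ps : List (List Char)) :
    pvSumB m k (p :: ps) = pvContrib m k p.length + pvSumB m k ps := by
  by_cases h : m ≤ (p.length : Int) <;>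
    simp [pvSumB, pvContrib, h]

-- B's value of a case, with cur extra zeros credited to the leading segment
def pvHSum (m k : Int) (xs : List Char) (cur : Int) : Int :=
  pvContrib m k (cur + ((pvSeg xs).headD []).length) + pvSumB m k (pvSeg xs).tail

lemma pvLoopA_eq_hSum (m k : Int) :
    ∀ (xs : List Char) (ops cur : Int), pvLoopA m k xs ops cur = ops + pvHSum m k xs cur := by
  intro xs
  induction xs with
  | nil =>
    intro ops cur
    simp only [pvLoopA, pvHSum, pvSeg, pvSumB, List.headD, List.tail, List.filter_nil,
      List.map_nil, List.sum_nil, List.length_nil]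
    by_cases h : m ≤ cur <;> simp [pvContrib, h]
  | cons c rest ih =>
    intro ops cur
    rcases hps : pvSeg rest with _ | ⟨p, ps⟩
    · exact absurd hps (pvSeg_ne_nil rest)
    by_cases hc : c = '0'
    · subst hc
      have h1 : pvLoopA m k ('0' :: rest) ops cur = pvLoopA m k rest ops (cur + 1) := by
        simp [pvLoopA]
      have hseg : pvSeg ('0' :: rest) = ('0' :: p) :: ps := by simp [pvSeg, hps]
      rw [h1, ih]
      simp only [pvHSum, hps, hseg, List.headD, List.tail]
      have e : cur + ((('0' :: p).length : Nat) : Int) = (cur + 1) + (p.length : Int) := by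
        push_cast [List.length_cons]; ring
      rw [e]
    · have h1 : pvLoopA m k (c :: rest) ops cur
          = pvLoopA m k rest (if m ≤ cur then ops + PySem.Int.floordiv (cur + k - 1) k else ops) 0 := by
        simp [pvLoopA, hc]
      have hseg : pvSeg (c :: rest) = [] :: p :: ps := by simp [pvSeg, hps, hc]
      have hflush : (if m ≤ cur then ops + PySem.Int.floordiv (cur + k - 1) k else ops)
          = ops + pvContrib m k cur := by
        unfold pvContrib; split <;> simp
      rw [h1, ih, hflush]
      simp only [pvHSum, hps, hseg, List.headD, List.tail, pvSumB_cons, List.length_nil, Nat.cast_zero, add_zero]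
      ring

lemma pvCase_eq (m k : Int) (xs : List Char) :
    pvLoopA m k xs 0 0 = pvSumB m k (pvSeg xs) := by
  rw [pvLoopA_eq_hSum]
  rcases hps : pvSeg xs with _ | ⟨p, ps⟩
  · exact absurd hps (pvSeg_ne_nil xs)
  · simp [pvHSum, hps, pvSumB_cons]

-- ===== VERDICT (by name: the statement is the Claim_ definition above) =====
theorem minimum_timars_spec : Claim_equal_minimum_timars := by
  intro t test_cases _ _
  unfold Spec_minimum_timars minimum_timars minimum_timars_alt
  rw [PySem.List.foldl_append_singleton_eq_map]
  exact List.map_congr_left (fun tc _ => pvCase_eq _ _ _)
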